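-- pv_equiv track=rewrite | github.com/londrwus/EGE-2024 | N23/6.py | f
-- ===== SOURCE A (Python) =====
-- def f(x, stop):
--     if x > stop:
--         return 0
--     if x == stop:
--         return 1
--
--     return (
--         f(x + 1, stop)
--         + f(int(str(bin(x)[2:]) + "0", 2), stop)
--         + f(int(str(bin(x)[2:]) + "1", 2), stop)
--     )
-- ===== SOURCE B (Python) =====
-- def f(x, stop):
--     if x > stop:
--         return 0
--     n = stop - x
--     ways = [0] * (n + 1)          # ways[j] = number of paths from x+j to stop
--     ways[n] = 1
--     for i in range(1, n + 1):
--         v = stop - i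
--         t = ways[n - i + 1]
--         if 2 * v <= stop:
--             t += ways[2 * v - x]
--         if 2 * v + 1 <= stop:
--             t += ways[2 * v + 1 - x]
--         ways[n - i] = t
--     return ways[0]
-- ===== Notes on version B (the rewrite author's own statement) =====
-- stated objective: faster
-- what changed: Replaces A's exponential three-way recursion with a bottom-up dynamic-programming array over [x, stop], computing each position's path count once.
-- outside the precondition, e.g. on f(0, 3): A does not finish within the time limit, B returns 6; on f(-2, 3): A raises RecursionError, B returns 8
import Mathlib
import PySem

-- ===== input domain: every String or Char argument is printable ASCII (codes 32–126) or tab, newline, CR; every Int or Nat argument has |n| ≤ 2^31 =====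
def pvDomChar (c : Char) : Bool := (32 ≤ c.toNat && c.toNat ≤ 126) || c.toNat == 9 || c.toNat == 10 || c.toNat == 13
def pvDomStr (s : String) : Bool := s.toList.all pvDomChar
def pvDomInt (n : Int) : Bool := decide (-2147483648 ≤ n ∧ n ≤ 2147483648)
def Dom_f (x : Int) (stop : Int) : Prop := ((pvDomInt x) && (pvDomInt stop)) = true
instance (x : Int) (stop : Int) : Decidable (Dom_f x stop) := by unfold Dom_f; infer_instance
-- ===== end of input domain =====

-- B replaces A's exponential triple recursion by a bottom-up DP array over [x, stop] (asymptotically faster).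

-- ===== PORT A =====
-- A recurses on x+1, 2x, 2x+1 (for x ≥ 1, bin(x)[2:]+"0"/"1" re-parsed base 2 is exactly 2x / 2x+1).
-- The recursion is modelled with a fuel of (stop-x).toNat+1: inside Pre_f every recursive call
-- increases x by at least 1, so this fuel is never exhausted and the port computes exactly A's value.
def fA : Nat → Int → Int → Int
  | 0, _, _ => 0
  | fuel+1, x, stop =>
    if x > stop then 0
    else if x = stop then 1
    else fA fuel (x+1) stop + fA fuel (2*x) stop + fA fuel (2*x+1) stop

def f (x : Int) (stop : Int) : Int := fA ((stop - x).toNat + 1) x stop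

-- ===== PORT B =====
-- Python list read/write ways[i] / ways[i] = v, with Python's negative-index wraparound
-- (pyIdx?); where Python would raise IndexError the read yields 0 and the write is a no-op —
-- unreachable wherever Source B returns, since Python's raise is excluded from the comparison.
def lgetZ (l : List Int) (i : Int) : Int := (PySem.List.pyGet? l i).getD 0
def lsetZ (l : List Int) (i : Int) (v : Int) : List Int :=
  match PySem.List.pyIdx? l.length i with
  | some m => l.set m v
  | none => l

def bStep (x stop n : Int) (ways : List Int) (i : Int) : List Int :=
  let v := stop - i
  let t := lgetZ ways (n - i + 1)
  let t := if 2*v ≤ stop then t + lgetZ ways (2*v - x) else t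
  let t := if 2*v + 1 ≤ stop then t + lgetZ ways (2*v + 1 - x) else t
  lsetZ ways (n - i) t

def f_alt (x : Int) (stop : Int) : Int :=
  if x > stop then 0
  else
    let n := stop - x
    let ways := lsetZ (List.replicate (n.toNat + 1) 0) n 1
    lgetZ ((PySem.List.pyRange 1 (n+1) 1).foldl (bStep x stop n) ways) 0

-- ===== PRECONDITION & SPEC =====
-- Pre_f excludes x ≤ 0 with x ≤ stop: there Python A never returns (x = 0 recurses on itself
-- forever via 2*0 = 0; x < 0 raises ValueError, since bin(x)[2:] is "b…" which int(·, 2) rejects).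
def Pre_f (x : Int) (stop : Int) : Prop := 1 ≤ x ∨ stop < x
instance (x : Int) (stop : Int) : Decidable (Pre_f x stop) := by unfold Pre_f; infer_instance
def pvWitness_f : Int × Int := (1, 6)
def Spec_f (x : Int) (stop : Int) (out : Int) : Prop := out = f_alt x stop
instance (x : Int) (stop : Int) (out : Int) : Decidable (Spec_f x stop out) := by unfold Spec_f; infer_instance

-- ===== CLAIM (what is proved, stated in full; the proofs are below) =====
def Claim_equal_f : Prop := ∀ (x : Int) (stop : Int), Dom_f x stop → Pre_f x stop → Spec_f x stop (f x stop)

-- ===== LEMMAS AND PROOFS =====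

lemma fA_step (fuel : Nat) (x stop : Int) :
    fA (fuel+1) x stop = if x > stop then 0 else if x = stop then 1
      else fA fuel (x+1) stop + fA fuel (2*x) stop + fA fuel (2*x+1) stop := rfl

lemma fA_succ (stop : Int) : ∀ (fuel : Nat) (x : Int), 1 ≤ x → stop - x < fuel →
    fA (fuel+1) x stop = fA fuel x stop := by
  intro fuel
  induction fuel with
  | zero =>
    intro x hx h
    have hlt : stop < x := by omega
    simp [fA, hlt]
  | succ k ih =>
    intro x hx h
    by_cases h1 : stop < x
    · simp [fA, h1]
    · by_cases h2 : x = stop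
      · simp [fA, h2]
      · have e1 := ih (x+1) (by omega) (by omega)
        have e2 := ih (2*x) (by omega) (by omega)
        have e3 := ih (2*x+1) (by omega) (by omega)
        rw [fA_step (k+1), e1, e2, e3, fA_step k]

lemma fA_add (stop : Int) (d : Nat) : ∀ (fuel : Nat) (x : Int), 1 ≤ x → stop - x < fuel →
    fA (fuel + d) x stop = fA fuel x stop := by
  induction d with
  | zero => intro fuel x _ _; rfl
  | succ m ih =>
    intro fuel x hx h
    have : fuel + (m+1) = (fuel + m) + 1 := by omega
    rw [this, fA_succ stop (fuel + m) x hx (by omega), ih fuel x hx h]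

lemma fA_stable (stop : Int) (f1 f2 : Nat) (x : Int) (hx : 1 ≤ x)
    (h1 : stop - x < f1) (h2 : stop - x < f2) : fA f1 x stop = fA f2 x stop := by
  rcases le_total f1 f2 with h | h
  · obtain ⟨d, rfl⟩ := Nat.exists_eq_add_of_le h
    rw [fA_add stop d f1 x hx h1]
  · obtain ⟨d, rfl⟩ := Nat.exists_eq_add_of_le h
    rw [fA_add stop d f2 x hx h2]

lemma f_gt (x stop : Int) (h : stop < x) : f x stop = 0 := by
  have : (stop - x).toNat = 0 := by omega
  simp [f, fA, h]

lemma f_self (x stop : Int) (h : x = stop) : f x stop = 1 := by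
  subst h
  simp [f, fA]

lemma f_rec (x stop : Int) (hx : 1 ≤ x) (hlt : x < stop) :
    f x stop = f (x+1) stop + f (2*x) stop + f (2*x+1) stop := by
  unfold f
  have h2 : x ≠ stop := by omega
  rw [fA_step, if_neg (by omega : ¬ x > stop), if_neg h2]
  congr 1
  · congr 1
    · exact fA_stable stop _ _ (x+1) (by omega) (by omega) (by omega)
    · exact fA_stable stop _ _ (2*x) (by omega) (by omega) (by omega)
  · exact fA_stable stop _ _ (2*x+1) (by omega) (by omega) (by omega)

lemma getD_set_self (l : List Int) (m : Nat) (v : Int) (h : m < l.length) :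
    (l.set m v).getD m 0 = v := by
  simp [List.getD, h]

lemma getD_set_ne (l : List Int) (m j : Nat) (v : Int) (h : m ≠ j) :
    (l.set m v).getD j 0 = l.getD j 0 := by
  simp [List.getD, h]

lemma lgetZ_eq (l : List Int) (i : Int) (h0 : 0 ≤ i) (h1 : i < (l.length : Int)) :
    lgetZ l i = l.getD i.toNat 0 := by
  simp [lgetZ, PySem.List.pyGet?, PySem.List.pyIdx?, h0, h1, List.getD, Option.bind]

lemma lsetZ_eq (l : List Int) (i : Int) (v : Int) (h0 : 0 ≤ i) (h1 : i < (l.length : Int)) :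
    lsetZ l i v = l.set i.toNat v := by
  simp [lsetZ, PySem.List.pyIdx?, h0, h1]

lemma binv (x stop : Int) (hx : 1 ≤ x) (hxs : x ≤ stop) :
    ∀ k : Nat, (k : Int) ≤ stop - x →
    (((PySem.List.pyRange 1 ((k:Int)+1) 1).foldl (bStep x stop (stop - x))
        (lsetZ (List.replicate ((stop - x).toNat + 1) 0) (stop - x) 1)).length
        = (stop - x).toNat + 1) ∧
    (∀ j : Nat, j ≤ (stop - x).toNat →
      ((PySem.List.pyRange 1 ((k:Int)+1) 1).foldl (bStep x stop (stop - x))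
        (lsetZ (List.replicate ((stop - x).toNat + 1) 0) (stop - x) 1)).getD j 0
        = if (stop - x).toNat ≤ j + k then f (x + (j:Int)) stop else 0) := by
  intro k
  set N := (stop - x).toNat with hN
  induction k with
  | zero =>
    intro _
    rw [PySem.List.pyRange_one_eq_nil (by omega)]
    simp only [List.foldl_nil]
    rw [lsetZ_eq _ _ _ (by omega) (by simp; omega)]
    constructor
    · simp
    · intro j hj
      rw [show (stop - x).toNat = N from hN.symm]
      by_cases hjN : j = N
      · rw [hjN, getD_set_self _ _ _ (by simp)]
        rw [if_pos (by omega)]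
        rw [f_self (x + (N:Int)) stop (by omega)]
      · rw [getD_set_ne _ _ _ _ (by omega)]
        rw [if_neg (by omega)]
        simp
  | succ k ih =>
    intro hk
    have hk' : (k : Int) ≤ stop - x := by push_cast at hk; omega
    obtain ⟨hlen, hval⟩ := ih hk'
    have hcast : (((k+1:Nat)):Int) + 1 = ((k:Int)+1)+1 := by push_cast; ring
    rw [hcast, PySem.List.pyRange_one_succ_right (by omega : (1:Int) ≤ (k:Int)+1),
      List.foldl_append, List.foldl_cons, List.foldl_nil]
    set prev := (PySem.List.pyRange 1 ((k:Int)+1) 1).foldl (bStep x stop (stop - x))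
        (lsetZ (List.replicate (N + 1) 0) (stop - x) 1) with hprev
    -- the step at i = (k:Int)+1, position v = stop - i
    have hv1 : 1 ≤ stop - ((k:Int)+1) := by omega
    have hvs : stop - ((k:Int)+1) < stop := by omega
    have hread1 : lgetZ prev (stop - x - ((k:Int)+1) + 1) = f (stop - ((k:Int)+1) + 1) stop := by
      rw [lgetZ_eq _ _ (by omega) (by rw [hlen]; push_cast; omega)]
      rw [show (stop - x - ((k:Int)+1) + 1).toNat = N - k by omega]
      rw [hval (N - k) (by omega), if_pos (by omega)]
      congr 1
      omega
    have hread2 : 2*(stop - ((k:Int)+1)) ≤ stop →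
        lgetZ prev (2*(stop - ((k:Int)+1)) - x) = f (2*(stop - ((k:Int)+1))) stop := by
      intro h2
      rw [lgetZ_eq _ _ (by omega) (by rw [hlen]; push_cast; omega)]
      rw [hval (2*(stop - ((k:Int)+1)) - x).toNat (by omega), if_pos (by omega)]
      congr 1
      omega
    have hread3 : 2*(stop - ((k:Int)+1)) + 1 ≤ stop →
        lgetZ prev (2*(stop - ((k:Int)+1)) + 1 - x) = f (2*(stop - ((k:Int)+1)) + 1) stop := by
      intro h3
      rw [lgetZ_eq _ _ (by omega) (by rw [hlen]; push_cast; omega)]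
      rw [hval (2*(stop - ((k:Int)+1)) + 1 - x).toNat (by omega), if_pos (by omega)]
      congr 1
      omega
    have hstep : bStep x stop (stop - x) prev ((k:Int)+1)
        = lsetZ prev (stop - x - ((k:Int)+1)) (f (stop - ((k:Int)+1)) stop) := by
      show lsetZ prev (stop - x - ((k:Int)+1))
          (if 2*(stop - ((k:Int)+1)) + 1 ≤ stop then
            (if 2*(stop - ((k:Int)+1)) ≤ stop then
              lgetZ prev (stop - x - ((k:Int)+1) + 1) + lgetZ prev (2*(stop - ((k:Int)+1)) - x)
            else lgetZ prev (stop - x - ((k:Int)+1) + 1)) + lgetZ prev (2*(stop - ((k:Int)+1)) + 1 - x)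
          else
            (if 2*(stop - ((k:Int)+1)) ≤ stop then
              lgetZ prev (stop - x - ((k:Int)+1) + 1) + lgetZ prev (2*(stop - ((k:Int)+1)) - x)
            else lgetZ prev (stop - x - ((k:Int)+1) + 1)))
          = lsetZ prev (stop - x - ((k:Int)+1)) (f (stop - ((k:Int)+1)) stop)
      congr 1
      rw [hread1, f_rec (stop - ((k:Int)+1)) stop hv1 hvs]
      by_cases h2 : 2*(stop - ((k:Int)+1)) ≤ stop
      · rw [if_pos h2, hread2 h2]
        by_cases h3 : 2*(stop - ((k:Int)+1)) + 1 ≤ stop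
        · rw [if_pos h3, hread3 h3]
        · rw [if_neg h3, f_gt (2*(stop - ((k:Int)+1))+1) stop (by omega)]
          ring
      · have h3 : ¬ (2*(stop - ((k:Int)+1)) + 1 ≤ stop) := by omega
        rw [if_neg h2, if_neg h3, f_gt (2*(stop - ((k:Int)+1))) stop (by omega),
          f_gt (2*(stop - ((k:Int)+1))+1) stop (by omega)]
        ring
    rw [hstep, lsetZ_eq _ _ _ (by omega) (by rw [hlen]; push_cast; omega)]
    constructor
    · simp [hlen]
    · intro j hj
      rw [show (stop - x - ((k:Int)+1)).toNat = N - (k+1) by omega]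
      by_cases hje : j = N - (k+1)
      · rw [hje, getD_set_self _ _ _ (by omega)]
        rw [if_pos (by omega)]
        congr 1
        omega
      · rw [getD_set_ne _ _ _ _ (by omega)]
        rw [hval j hj]
        by_cases hc : N ≤ j + k
        · rw [if_pos hc, if_pos (by omega)]
        · rw [if_neg hc, if_neg (by omega)]

-- ===== VERDICT (by name: the statement is the Claim_ definition above) =====
theorem f_spec : Claim_equal_f := by
  intro x stop _ hpre
  unfold Spec_f
  by_cases hgt : stop < x
  · rw [f_gt x stop hgt]
    unfold f_alt
    rw [if_pos (by omega)]
  · have hx : 1 ≤ x := by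
      rcases hpre with h | h
      · exact h
      · omega
    have hxs : x ≤ stop := by omega
    unfold f_alt
    rw [if_neg (by omega)]
    show f x stop = lgetZ ((PySem.List.pyRange 1 ((stop - x)+1) 1).foldl (bStep x stop (stop - x))
      (lsetZ (List.replicate ((stop - x).toNat + 1) 0) (stop - x) 1)) 0
    have hNle : (((stop - x).toNat : Nat) : Int) ≤ stop - x := by omega
    obtain ⟨hlen, hval⟩ := binv x stop hx hxs (stop - x).toNat hNle
    have hr : PySem.List.pyRange 1 ((stop - x) + 1) 1
        = PySem.List.pyRange 1 ((((stop - x).toNat : Nat) : Int) + 1) 1 := by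
      congr 1
      omega
    rw [hr]
    have h0 := hval 0 (by omega)
    rw [if_pos (by omega)] at h0
    rw [lgetZ_eq _ _ (by omega) (by rw [hlen]; push_cast; omega)]
    simpa using h0.symm
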